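-- pv_equiv track=rewrite | github.com/Roha-Lee/Algorithm-Study | BOJ/1450.py | get_all_possible_case
-- ===== SOURCE A (Python) =====
-- from itertools import combinations
--
-- def get_all_possible_case(weights, c):
--     possible = []
--     for i in range(1, len(weights) + 1):
--         for comb in combinations(weights, i):
--             curr_sum = sum(comb)
--             if curr_sum <= c:
--                 possible.append(curr_sum)
--     return possible
-- ===== SOURCE B (Python) =====
-- def get_all_possible_case(weights, c):
--     # A single include/exclude DFS carrying the running sum incrementally,
--     # bucketing kept sums by subset size; concatenating the buckets
--     # reproduces combinations order per size.
--     n = len(weights)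
--     buckets = [[] for _ in range(n + 1)]
--
--     def dfs(j, size, acc):
--         if j == n:
--             if size > 0 and acc <= c:
--                 buckets[size].append(acc)
--             return
--         dfs(j + 1, size + 1, acc + weights[j])
--         dfs(j + 1, size, acc)
--
--     dfs(0, 0, 0)
--     return [s for b in buckets[1:] for s in b]
-- ===== Notes on version B (the rewrite author's own statement) =====
-- stated objective: alternative
-- what changed: Replaces the per-size itertools.combinations sweep (each combination re-summed from scratch) by a single include/exclude DFS over the items that carries the running sum incrementally and buckets kept sums by subset size, then concatenates the buckets.
import Mathlib
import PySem

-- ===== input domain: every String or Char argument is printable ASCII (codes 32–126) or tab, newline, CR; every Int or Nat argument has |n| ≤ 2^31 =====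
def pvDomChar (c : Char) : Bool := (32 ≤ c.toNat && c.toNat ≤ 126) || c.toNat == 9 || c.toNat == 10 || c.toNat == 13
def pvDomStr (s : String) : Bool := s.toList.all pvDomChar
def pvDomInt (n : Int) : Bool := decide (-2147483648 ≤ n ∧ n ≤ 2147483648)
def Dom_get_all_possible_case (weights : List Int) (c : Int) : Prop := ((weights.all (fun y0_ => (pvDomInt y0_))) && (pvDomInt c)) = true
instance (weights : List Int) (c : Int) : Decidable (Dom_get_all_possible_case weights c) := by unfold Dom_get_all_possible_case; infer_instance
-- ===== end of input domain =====

-- B replaces A's per-size itertools.combinations sweep (each combination re-summed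
-- from scratch) by one include/exclude DFS carrying the running sum incrementally,
-- bucketing kept sums by subset size (objective: alternative algorithm, same order).

-- ===== PORT A =====
-- itertools.combinations(xs, k) in Python's order (lexicographic by index)
def pyCombos : Nat → List Int → List (List Int)
  | 0, _ => [[]]
  | _ + 1, [] => []
  | k + 1, x :: xs => (pyCombos k xs).map (fun l => x :: l) ++ pyCombos (k + 1) xs

def get_all_possible_case (weights : List Int) (c : Int) : List Int :=
  (PySem.List.pyRange 1 ((weights.length : Int) + 1) 1).foldl (fun possible i =>
    (pyCombos i.toNat weights).foldl (fun possible comb =>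
      let currSum := comb.sum
      if currSum ≤ c then possible ++ [currSum] else possible) possible) []

-- ===== PORT B =====
-- buckets[size].append(v)
def appendAt : List (List Int) → Nat → Int → List (List Int)
  | [], _, _ => []
  | b :: bs, 0, v => (b ++ [v]) :: bs
  | b :: bs, s + 1, v => b :: appendAt bs s v

-- dfs(j, size, acc): structural recursion on the remaining suffix of weights,
-- include branch first, then exclude, threading the buckets
def dfsB (c : Int) : List Int → Nat → Int → List (List Int) → List (List Int)
  | [], size, acc, b => if 0 < size ∧ acc ≤ c then appendAt b size acc else b
  | w :: ws, size, acc, b => dfsB c ws size acc (dfsB c ws (size + 1) (acc + w) b)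

def get_all_possible_case_alt (weights : List Int) (c : Int) : List Int :=
  ((dfsB c weights 0 0 (List.replicate (weights.length + 1) [])).drop 1).flatten

-- ===== PRECONDITION & SPEC =====
def Spec_get_all_possible_case (weights : List Int) (c : Int) (out : List Int) : Prop := out = get_all_possible_case_alt weights c
instance (weights : List Int) (c : Int) (out : List Int) : Decidable (Spec_get_all_possible_case weights c out) := by unfold Spec_get_all_possible_case; infer_instance

-- ===== CLAIM (what is proved, stated in full; the proofs are below) =====
def Claim_equal_get_all_possible_case : Prop := ∀ (weights : List Int) (c : Int), Dom_get_all_possible_case weights c → Spec_get_all_possible_case weights c (get_all_possible_case weights c)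

-- ===== LEMMAS AND PROOFS =====

-- common normal form: for each size k+1 (k < n), the sums of the size-(k+1)
-- combinations that are ≤ c, in combinations order
def commonForm (ws : List Int) (c : Int) : List Int :=
  ((List.range ws.length).map (fun k =>
    ((pyCombos (k + 1) ws).map List.sum).filter (fun v => decide (v ≤ c)))).flatten

-- ---- A side ----
lemma inner_eq (c : Int) (l : List (List Int)) (poss : List Int) :
    l.foldl (fun possible comb =>
      if comb.sum ≤ c then possible ++ [comb.sum] else possible) poss
    = poss ++ (l.map List.sum).filter (fun v => decide (v ≤ c)) := by
  induction l generalizing poss with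
  | nil => simp
  | cons x xs ih =>
    simp only [List.foldl_cons, List.map_cons, List.filter_cons]
    by_cases h : x.sum ≤ c
    · simp [h, ih]
    · simp [h, ih]

lemma outer_eq (g : Nat → List Int) (l : List Nat) (acc : List Int) :
    l.foldl (fun a k => a ++ g k) acc = acc ++ (l.map g).flatten := by
  induction l generalizing acc with
  | nil => simp
  | cons x xs ih => simp [ih]

lemma foldl_congr' (l : List Nat) (f g : List Int → Nat → List Int)
    (h : ∀ a k, f a k = g a k) (init : List Int) : l.foldl f init = l.foldl g init := by
  induction l generalizing init with
  | nil => rfl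
  | cons x xs ih => simp only [List.foldl_cons, h, ih]

lemma A_eq (ws : List Int) (c : Int) : get_all_possible_case ws c = commonForm ws c := by
  unfold get_all_possible_case
  rw [PySem.List.pyRange_one]
  have h1 : ((ws.length : Int) + 1 - 1).toNat = ws.length := by omega
  rw [h1, List.foldl_map]
  have h2 : ∀ (poss : List Int) (k : Nat),
      (pyCombos ((1 : Int) + k).toNat ws).foldl (fun possible comb =>
        if comb.sum ≤ c then possible ++ [comb.sum] else possible) poss
      = poss ++ ((pyCombos (k + 1) ws).map List.sum).filter (fun v => decide (v ≤ c)) := by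
    intro poss k
    have hk : ((1 : Int) + k).toNat = k + 1 := by omega
    rw [hk, inner_eq]
  refine (foldl_congr' (List.range ws.length) _
      (fun poss k => poss ++ ((pyCombos (k + 1) ws).map List.sum).filter (fun v => decide (v ≤ c)))
      ?_ []).trans ?_
  · intro poss k; exact h2 poss k
  · rw [outer_eq]; rfl

-- ---- B side ----
-- append f s to the s-th bucket, for every bucket
def bump : List (List Int) → (Nat → List Int) → List (List Int)
  | [], _ => []
  | bl :: bs, f => (bl ++ f 0) :: bump bs (fun s => f (s + 1))

-- what dfsB contributes to bucket s
def contrib (c : Int) (ws : List Int) (size : Nat) (acc : Int) (s : Nat) : List Int :=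
  if size ≤ s ∧ 0 < s then
    ((pyCombos (s - size) ws).map (fun l => acc + l.sum)).filter (fun v => decide (v ≤ c))
  else []

lemma bump_congr {b : List (List Int)} {f g : Nat → List Int}
    (h : ∀ s, f s = g s) : bump b f = bump b g := by
  induction b generalizing f g with
  | nil => rfl
  | cons bl bs ih => simp [bump, h 0, ih (fun s => h (s + 1))]

lemma bump_nil (b : List (List Int)) : bump b (fun _ => []) = b := by
  induction b with
  | nil => rfl
  | cons bl bs ih => simp [bump, ih]

lemma bump_bump (b : List (List Int)) (f g : Nat → List Int) :
    bump (bump b f) g = bump b (fun s => f s ++ g s) := by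
  induction b generalizing f g with
  | nil => rfl
  | cons bl bs ih => simp [bump, ih]

lemma appendAt_eq_bump (b : List (List Int)) (k : Nat) (v : Int) :
    appendAt b k v = bump b (fun s => if s = k then [v] else []) := by
  induction b generalizing k with
  | nil => rfl
  | cons bl bs ih =>
    cases k with
    | zero =>
      simp only [appendAt, bump]
      rw [bump_congr (g := fun _ => ([] : List Int)) (fun s => by simp), bump_nil]
      simp
    | succ k =>
      simp only [appendAt, bump, ih]
      have h0 : (if (0 : Nat) = k + 1 then [v] else ([] : List Int)) = [] := by simp
      rw [h0, List.append_nil]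
      congr 1
      exact bump_congr (fun s => by simp)

lemma contrib_cons (c : Int) (w : Int) (ws : List Int) (size : Nat) (acc : Int) (s : Nat) :
    contrib c (w :: ws) size acc s
    = contrib c ws (size + 1) (acc + w) s ++ contrib c ws size acc s := by
  unfold contrib
  by_cases h : size ≤ s ∧ 0 < s
  · rcases Nat.lt_or_ge size s with hlt | hge
    · -- size < s: split pyCombos on the head
      have hk : s - size = (s - (size + 1)) + 1 := by omega
      have hcond : size + 1 ≤ s ∧ 0 < s := ⟨by omega, h.2⟩
      rw [if_pos h, if_pos hcond, if_pos h, hk]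
      simp only [pyCombos, List.map_append, List.filter_append, List.map_map]
      congr 2
      apply List.map_congr_left
      intro l _
      simp [add_assoc]
    · -- size = s
      have hs : s = size := by omega
      subst hs
      have hne : ¬ (s + 1 ≤ s ∧ 0 < s) := by omega
      rw [if_pos h, if_neg hne, if_pos h]
      simp [pyCombos]
  · have hne : ¬ (size + 1 ≤ s ∧ 0 < s) := by omega
    rw [if_neg h, if_neg hne, if_neg h]
    simp

lemma dfs_eq (c : Int) (ws : List Int) :
    ∀ (size : Nat) (acc : Int) (b : List (List Int)),
      dfsB c ws size acc b = bump b (contrib c ws size acc) := by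
  induction ws with
  | nil =>
    intro size acc b
    simp only [dfsB]
    by_cases h : 0 < size ∧ acc ≤ c
    · rw [if_pos h, appendAt_eq_bump]
      apply bump_congr
      intro s
      by_cases hs : s = size
      · subst hs
        simp [contrib, h.1, h.2, pyCombos]
      · unfold contrib
        by_cases hc : size ≤ s ∧ 0 < s
        · have hk : s - size = (s - size - 1) + 1 := by omega
          rw [if_pos hc, hk]
          simp [pyCombos, hs]
        · simp [hc, hs]
    · rw [if_neg h]
      rw [show b = bump b (fun _ => []) from (bump_nil b).symm]
      rw [bump_bump]
      apply bump_congr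
      intro s
      unfold contrib
      by_cases hc : size ≤ s ∧ 0 < s
      · by_cases hs : s = size
        · subst hs
          have hac : ¬ acc ≤ c := by
            intro hle; exact h ⟨hc.2, hle⟩
          simp [pyCombos, hac]
        · have hk : s - size = (s - size - 1) + 1 := by omega
          rw [if_pos hc, hk]
          simp [pyCombos]
      · simp [hc]
  | cons w ws ih =>
    intro size acc b
    simp only [dfsB]
    rw [ih (size + 1) (acc + w) b, ih size acc, bump_bump]
    apply bump_congr
    intro s
    exact (contrib_cons c w ws size acc s).symm

lemma bump_replicate (m : Nat) (f : Nat → List Int) :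
    bump (List.replicate m []) f = (List.range m).map f := by
  induction m generalizing f with
  | zero => rfl
  | succ m ih =>
    rw [List.replicate_succ]
    simp only [bump, List.nil_append, ih, List.range_succ_eq_map, List.map_cons, List.map_map]
    rfl

lemma B_eq (ws : List Int) (c : Int) : get_all_possible_case_alt ws c = commonForm ws c := by
  unfold get_all_possible_case_alt commonForm
  rw [dfs_eq, bump_replicate]
  rw [List.range_succ_eq_map, List.map_cons, List.drop_one, List.tail_cons, List.map_map]
  congr 1
  apply List.map_congr_left
  intro k _
  simp only [Function.comp]
  unfold contrib
  rw [if_pos ⟨Nat.zero_le _, Nat.succ_pos k⟩]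
  simp

-- ===== VERDICT (by name: the statement is the Claim_ definition above) =====
theorem get_all_possible_case_spec : Claim_equal_get_all_possible_case := by
  intro ws c _
  unfold Spec_get_all_possible_case
  rw [A_eq, B_eq]
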